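-- pv_equiv track=rewrite | github.com/primrose101/CS322 | finite_state_machines/keywords.py | kwboolean_fsm
-- ===== SOURCE A (Python) =====
-- def kwboolean_fsm(string_input, index):
--     i = index
--
--     table = [
--         [1, 5, 5, 5],
--         [5, 2, 5, 5],
--         [5, 3, 5, 5],
--         [5, 5, 4, 5],
--         [5, 5, 5, 5],
--         [5, 5, 5, 5],
--     ]
--
--     state = 0
--     inputstate = 0
--
--     string_length = len(string_input)
--
--     while i != string_length:
--         if string_input[i] == 'B':
--             inputstate = 0
--         elif string_input[i] == 'O':
--             inputstate = 1
--         elif string_input[i] == 'L':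
--             inputstate = 2
--         else:
--             inputstate = 3
--
--         state = table[state][inputstate]
--
--         if state == 5:
--             break
--
--         i += 1
--
--     return i - index
-- ===== SOURCE B (Python) =====
-- def kwboolean_fsm(string_input, index):
--     keyword = 'BOOL'
--     i = index
--     while i != len(string_input) and i - index < len(keyword):
--         if string_input[i] != keyword[i - index]:
--             break
--         i += 1
--     return i - index
-- ===== Notes on version B (the rewrite author's own statement) =====
-- stated objective: simpler
-- what changed: Replaced the DFA transition table and state/inputstate machinery with direct greedy prefix matching of the characters against the keyword 'BOOL'.
import Mathlib
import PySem

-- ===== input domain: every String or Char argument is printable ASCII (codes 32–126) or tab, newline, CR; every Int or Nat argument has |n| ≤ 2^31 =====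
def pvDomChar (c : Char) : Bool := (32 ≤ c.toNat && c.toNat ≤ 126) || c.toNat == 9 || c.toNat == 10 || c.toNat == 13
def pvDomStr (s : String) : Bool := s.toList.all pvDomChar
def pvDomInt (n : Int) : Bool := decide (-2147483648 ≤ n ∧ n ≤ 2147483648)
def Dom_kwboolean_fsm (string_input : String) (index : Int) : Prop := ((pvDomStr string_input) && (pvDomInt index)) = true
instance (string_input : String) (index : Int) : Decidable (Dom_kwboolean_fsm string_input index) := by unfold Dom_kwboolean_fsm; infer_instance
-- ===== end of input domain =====

-- B replaces A's DFA transition table and state/inputstate machinery by direct greedy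
-- prefix matching against the keyword 'BOOL' (objective: simpler; same cost).

-- ===== PORT A =====
-- A's transition table, exactly as in the Python source.
def kwbTable : List (List Nat) :=
  [[1, 5, 5, 5], [5, 2, 5, 5], [5, 3, 5, 5], [5, 5, 4, 5], [5, 5, 5, 5], [5, 5, 5, 5]]

-- A's while loop. The state strictly increases (state' ∈ {state+1, 5}; 5 breaks), so
-- 5 units of fuel always suffice; fuel is only a totality guard, never reached on Pre_ inputs
-- (on an out-of-range access Python raises IndexError; such inputs are outside Pre_).
def kwbLoopA (s : String) (index : Int) (fuel : Nat) (i : Int) (state : Nat) : Int :=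
  match fuel with
  | 0 => i - index
  | fuel' + 1 =>
    if i = PySem.Str.len s then i - index
    else
      match PySem.Str.pyGet? s i with
      | none => i - index  -- IndexError in Python: outside Pre_
      | some c =>
        let inputstate : Nat :=
          if c = 'B' then 0 else if c = 'O' then 1 else if c = 'L' then 2 else 3
        let state' := (kwbTable.getD state []).getD inputstate 5
        if state' = 5 then i - index
        else kwbLoopA s index fuel' (i + 1) state'

def kwboolean_fsm (string_input : String) (index : Int) : Int :=
  kwbLoopA string_input index 5 index 0

-- ===== PORT B =====
-- B's while loop: compare s[i] with 'BOOL'[i - index], stop at mismatch or after 4 chars.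
def kwbLoopB (s : String) (index : Int) (i : Int) : Int :=
  if _h : i ≠ PySem.Str.len s ∧ i - index < PySem.Str.len "BOOL" then
    match PySem.Str.pyGet? s i, PySem.Str.pyGet? "BOOL" (i - index) with
    | some c, some k => if c ≠ k then i - index else kwbLoopB s index (i + 1)
    | _, _ => i - index  -- IndexError in Python: outside Pre_
  else i - index
termination_by (4 - (i - index)).toNat
decreasing_by
  have : PySem.Str.len "BOOL" = 4 := by decide
  omega

def kwboolean_fsm_alt (string_input : String) (index : Int) : Int :=
  kwbLoopB string_input index index

-- ===== PRECONDITION & SPEC =====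
-- Python A raises IndexError when index is outside [-len, len]; those inputs are excluded.
def Pre_kwboolean_fsm (string_input : String) (index : Int) : Prop :=
  -(PySem.Str.len string_input) ≤ index ∧ index ≤ PySem.Str.len string_input
instance (string_input : String) (index : Int) : Decidable (Pre_kwboolean_fsm string_input index) := by unfold Pre_kwboolean_fsm; infer_instance
def pvWitness_kwboolean_fsm : String × Int := ("BOOLEAN x", 0)

def Spec_kwboolean_fsm (string_input : String) (index : Int) (out : Int) : Prop := out = kwboolean_fsm_alt string_input index
instance (string_input : String) (index : Int) (out : Int) : Decidable (Spec_kwboolean_fsm string_input index out) := by unfold Spec_kwboolean_fsm; infer_instance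

-- ===== CLAIM (what is proved, stated in full; the proofs are below) =====
def Claim_equal_kwboolean_fsm : Prop := ∀ (string_input : String) (index : Int), Dom_kwboolean_fsm string_input index → Pre_kwboolean_fsm string_input index → Spec_kwboolean_fsm string_input index (kwboolean_fsm string_input index)

-- ===== LEMMAS AND PROOFS =====

-- A's state-machine step at state k (k < 4) goes to k+1 exactly on the k-th keyword
-- character and to 5 otherwise.
theorem kwb_step (k : Nat) (hk : k < 4) (c : Char) :
    (kwbTable.getD k []).getD
      (if c = 'B' then 0 else if c = 'O' then 1 else if c = 'L' then 2 else 3) 5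
    = if some c = PySem.Str.pyGet? "BOOL" (k : Int) then k + 1 else 5 := by
  interval_cases k <;>
    by_cases hB : c = 'B' <;> by_cases hO : c = 'O' <;> by_cases hL : c = 'L' <;>
      simp_all [kwbTable]

-- The two loops agree: at state k with i = index + k, for any fuel covering the
-- remaining ≤ 5 - k iterations.
theorem kwb_loops_eq (s : String) (index : Int) :
    ∀ (fuel k : Nat), k ≤ 4 → 5 - k ≤ fuel →
      kwbLoopA s index fuel (index + k) k = kwbLoopB s index (index + k) := by
  intro fuel
  induction fuel with
  | zero => intro k hk hf; omega
  | succ fuel ih =>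
    intro k hk hf
    have hb : PySem.Str.len "BOOL" = 4 := by decide
    rw [kwbLoopA, kwbLoopB]
    have hik : (index + (k : Int)) - index = (k : Int) := by omega
    by_cases hlen : index + (k : Int) = PySem.Str.len s
    · simp [hlen]
    · rw [if_neg hlen]
      cases hg : PySem.Str.pyGet? s (index + (k : Int)) with
      | none => dsimp only; split <;> simp
      | some c =>
        dsimp only
        by_cases h4 : k = 4
        · -- state 4: A's row is all 5s, B's length bound fails; both return i - index
          subst h4
          have hrow : (kwbTable.getD 4 []).getD
              (if c = 'B' then 0 else if c = 'O' then 1 else if c = 'L' then 2 else 3) 5 = 5 := by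
            by_cases hB : c = 'B' <;> by_cases hO : c = 'O' <;> by_cases hL : c = 'L' <;>
              simp [kwbTable, hB, hO, hL]
          rw [hrow, if_pos rfl,
            dif_neg (show ¬(index + ((4 : Nat) : Int) ≠ PySem.Str.len s ∧
              index + ((4 : Nat) : Int) - index < PySem.Str.len "BOOL") by omega)]
        · -- state k < 4
          have hk4 : k < 4 := by omega
          rw [dif_pos (show index + ((k : Nat) : Int) ≠ PySem.Str.len s ∧
              index + ((k : Nat) : Int) - index < PySem.Str.len "BOOL" from ⟨hlen, by omega⟩)]
          have hkw : ∃ kc, PySem.Str.pyGet? "BOOL" ((k : Nat) : Int) = some kc := by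
            interval_cases k <;> exact ⟨_, rfl⟩
          obtain ⟨kc, hkc⟩ := hkw
          rw [hik, hkc]
          have hstep := kwb_step k hk4 c
          rw [hkc] at hstep
          by_cases hc : c = kc
          · -- match: A goes to state k+1, B recurses at i + 1
            subst hc
            rw [if_pos rfl] at hstep
            rw [hstep, if_neg (show ¬(k + 1 = 5) by omega),
              show index + (k : Int) + 1 = index + ((k + 1 : Nat) : Int) by push_cast; ring,
              ih (k + 1) (by omega) (by omega)]
            simp
          · -- mismatch: A's next state is 5, B breaks
            rw [if_neg (show ¬(some c = some kc) by simp [hc])] at hstep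
            rw [hstep, if_pos rfl]
            simp [hc]

-- ===== VERDICT (by name: the statement is the Claim_ definition above) =====
theorem kwboolean_fsm_spec : Claim_equal_kwboolean_fsm := by
  intro s index _ _
  unfold Spec_kwboolean_fsm kwboolean_fsm kwboolean_fsm_alt
  have h := kwb_loops_eq s index 5 0 (by omega) (by omega)
  simpa using h
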